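-- pv_equiv track=rewrite | github.com/jlumbroso/reluctant-walks | reluctant_walks/reference.py | tabulate_halfplane_walks
-- ===== SOURCE A (Python) =====
-- def tabulate_halfplane_walks(steps, N=10, meanders=True):
--
--     if meanders:
--         tab = {(h,0):1 for h in range(0, 1+max(steps)*N)}
--     else:
--         tab = {(0,0):1}
--
--     for i in range(1,N+1):
--         for h in range(0,1+max(steps)*(N)):
--             acc = 0
--             for s in steps:
--                 if (h+s,i-1) in tab:
--                     acc += tab[(h+s,i-1)]
--             tab[(h,i)] = acc
--
--     return tab
-- ===== SOURCE B (Python) =====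
-- def tabulate_halfplane_walks(steps, N=10, meanders=True):
--     # Top-down memoized recursion: rec(h, i) counts admissible i-step tails from height h.
--     if not meanders and N < 1:
--         return {(0, 0): 1}
--     M = max(steps) * N
--     memo = {}
--
--     def rec(h, i):
--         if i == 0:
--             return 1 if ((0 <= h <= M) if meanders else h == 0) else 0
--         if (h, i) in memo:
--             return memo[(h, i)]
--         v = 0
--         for s in steps:
--             if 0 <= h + s <= M:
--                 v += rec(h + s, i - 1)
--         memo[(h, i)] = v
--         return v
--
--     result = {(h, 0): 1 for h in range(M + 1)} if meanders else {(0, 0): 1}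
--     for i in range(1, N + 1):
--         for h in range(M + 1):
--             result[(h, i)] = rec(h, i)
--     return result
-- ===== Notes on version B (the rewrite author's own statement) =====
-- stated objective: alternative
-- what changed: Replaces A's bottom-up dict tabulation (inner scan with 'absent key means 0' dict lookups into the growing table) by a top-down memoized recursion rec(h,i) with a private memo dict and an explicit 0<=h+s<=M guard; the returned dict is assembled by querying rec.
import Mathlib
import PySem

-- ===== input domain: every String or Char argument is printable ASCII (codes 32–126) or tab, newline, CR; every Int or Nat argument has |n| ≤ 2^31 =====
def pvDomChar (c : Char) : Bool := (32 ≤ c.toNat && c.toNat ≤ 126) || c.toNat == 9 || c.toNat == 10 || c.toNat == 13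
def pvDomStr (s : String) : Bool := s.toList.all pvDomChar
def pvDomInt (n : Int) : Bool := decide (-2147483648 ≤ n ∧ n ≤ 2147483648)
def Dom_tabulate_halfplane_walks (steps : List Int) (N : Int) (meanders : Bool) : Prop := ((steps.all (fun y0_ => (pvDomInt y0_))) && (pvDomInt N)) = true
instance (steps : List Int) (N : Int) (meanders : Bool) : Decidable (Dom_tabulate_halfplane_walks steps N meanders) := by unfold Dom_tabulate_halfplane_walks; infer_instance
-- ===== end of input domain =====

-- B replaces A's bottom-up dict tabulation by a top-down memoized recursion rec(h,i) with a private memo dict; alternative decomposition, same cost.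


-- ===== PORT A =====
-- Python's max(steps) raises ValueError on []; Pre_ excludes every input on which it is evaluated,
-- so the '.getD 0' default below is never read on an input admitted by Pre_.
def tabulate_halfplane_walks (steps : List Int) (N : Int) (meanders : Bool) : List (Int × Int × Int) :=
  let mx : Int := (PySem.List.max? steps id).getD 0
  let tab : PySem.Dict (Int × Int) Int :=
    if meanders then
      (PySem.List.pyRange 0 (1 + mx * N) 1).foldl (fun d h => d.insert (h, 0) 1) PySem.Dict.empty
    else
      PySem.Dict.empty.insert (0, 0) 1
  let tab := (PySem.List.pyRange 1 (N + 1) 1).foldl (fun tab i =>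
      (PySem.List.pyRange 0 (1 + mx * N) 1).foldl (fun tab h =>
        let acc := steps.foldl (fun acc s =>
            match tab.get? (h + s, i - 1) with     -- 'if (h+s,i-1) in tab: acc += tab[(h+s,i-1)]'
            | some v => acc + v
            | none => acc) 0
        tab.insert (h, i) acc) tab) tab
  tab.items.map (fun p => (p.1.1, p.1.2, p.2))

-- ===== PORT B =====
-- Source B's nested 'rec(h, i)' with its private memo dict: fuel = the Python argument i (a Nat here),
-- the memo is threaded through explicitly (Python mutates the closure's dict in place).
def pvRec (steps : List Int) (M : Int) (meanders : Bool) :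
    Nat → Int → PySem.Dict (Int × Int) Int → Int × PySem.Dict (Int × Int) Int
  | 0, h, memo =>
      ((if meanders then (if 0 ≤ h ∧ h ≤ M then 1 else 0) else (if h = 0 then 1 else 0)), memo)
  | (k+1), h, memo =>
      match memo.get? (h, (k : Int) + 1) with
      | some v => (v, memo)
      | none =>
          let p := steps.foldl (fun (p : Int × PySem.Dict (Int × Int) Int) s =>
              if 0 ≤ h + s ∧ h + s ≤ M then
                let q := pvRec steps M meanders k (h + s) p.2
                (p.1 + q.1, q.2)
              else p) (0, memo)
          (p.1, p.2.insert (h, (k : Int) + 1) p.1)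

-- literal transliteration of Source B: early return, then memoized recursion queried to fill 'result'.
def tabulate_halfplane_walks_alt (steps : List Int) (N : Int) (meanders : Bool) : List (Int × Int × Int) :=
  if meanders = false ∧ N < 1 then
    (PySem.Dict.empty.insert ((0 : Int), (0 : Int)) (1 : Int)).items.map (fun p => (p.1.1, p.1.2, p.2))
  else
    let M : Int := (PySem.List.max? steps id).getD 0 * N
    let result : PySem.Dict (Int × Int) Int :=
      if meanders then
        (PySem.List.pyRange 0 (M + 1) 1).foldl (fun d h => d.insert (h, 0) 1) PySem.Dict.empty
      else PySem.Dict.empty.insert (0, 0) 1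
    let st := (PySem.List.pyRange 1 (N + 1) 1).foldl
      (fun (p : PySem.Dict (Int × Int) Int × PySem.Dict (Int × Int) Int) i =>
        (PySem.List.pyRange 0 (M + 1) 1).foldl
          (fun (q : PySem.Dict (Int × Int) Int × PySem.Dict (Int × Int) Int) h =>
            let r := pvRec steps M meanders i.toNat h q.2
            (q.1.insert (h, i) r.1, r.2)) p)
      (result, PySem.Dict.empty)
    st.1.items.map (fun p => (p.1.1, p.1.2, p.2))

-- ===== PRECONDITION & SPEC =====
-- Pre_ excludes exactly the inputs on which the Python A raises ValueError: max(steps) of an empty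
-- list, which A evaluates unless meanders is False and the fill loop is empty (N ≤ 0).
def Pre_tabulate_halfplane_walks (steps : List Int) (N : Int) (meanders : Bool) : Prop :=
  steps ≠ [] ∨ (meanders = false ∧ N ≤ 0)
instance (steps : List Int) (N : Int) (meanders : Bool) : Decidable (Pre_tabulate_halfplane_walks steps N meanders) := by unfold Pre_tabulate_halfplane_walks; infer_instance

def pvWitness_tabulate_halfplane_walks : List Int × Int × Bool := ([1, -1], 2, true)

def Spec_tabulate_halfplane_walks (steps : List Int) (N : Int) (meanders : Bool) (out : List (Int × Int × Int)) : Prop := out = tabulate_halfplane_walks_alt steps N meanders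
instance (steps : List Int) (N : Int) (meanders : Bool) (out : List (Int × Int × Int)) : Decidable (Spec_tabulate_halfplane_walks steps N meanders out) := by unfold Spec_tabulate_halfplane_walks; infer_instance

-- ===== CLAIM (what is proved, stated in full; the proofs are below) =====
def Claim_equal_tabulate_halfplane_walks : Prop := ∀ (steps : List Int) (N : Int) (meanders : Bool), Dom_tabulate_halfplane_walks steps N meanders → Pre_tabulate_halfplane_walks steps N meanders → Spec_tabulate_halfplane_walks steps N meanders (tabulate_halfplane_walks steps N meanders)

-- ===== LEMMAS AND PROOFS =====

-- The pure recurrence both programs tabulate: pvF … i h = number of admissible i-step walk tails from height h.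
def pvF (steps : List Int) (M : Int) (meanders : Bool) : Nat → Int → Int
  | 0, h => if meanders then (if 0 ≤ h ∧ h ≤ M then 1 else 0) else (if h = 0 then 1 else 0)
  | (i+1), h => steps.foldl (fun acc s => if 0 ≤ h + s ∧ h + s ≤ M then acc + pvF steps M meanders i (h + s) else acc) 0

def pvInit (M : Int) (meanders : Bool) : PySem.Dict (Int × Int) Int :=
  if meanders then (PySem.List.pyRange 0 (M + 1) 1).foldl (fun d h => d.insert (h, 0) 1) PySem.Dict.empty
  else PySem.Dict.empty.insert (0, 0) 1

def pvD (steps : List Int) (M : Int) (meanders : Bool) : Nat → PySem.Dict (Int × Int) Int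
  | 0 => pvInit M meanders
  | (k+1) => (PySem.List.pyRange 0 (M + 1) 1).foldl
      (fun d h => d.insert (h, (k : Int) + 1) (pvF steps M meanders (k+1) h)) (pvD steps M meanders k)

lemma get?_row_insert (j : Int) (f : Int → Int) :
    ∀ (hs : List Int) (d : PySem.Dict (Int × Int) Int) (key : Int × Int),
      (hs.foldl (fun d h => d.insert (h, j) (f h)) d).get? key
        = if key.2 = j ∧ key.1 ∈ hs then some (f key.1) else d.get? key := by
  intro hs
  induction hs with
  | nil => intro d key; simp
  | cons h t ih =>
    intro d key
    simp only [List.foldl_cons, ih]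
    rw [PySem.Dict.get?_insert]
    rcases key with ⟨x, y⟩
    simp only [List.mem_cons, Prod.mk.injEq]
    by_cases h1 : y = j <;> by_cases h3 : x = h <;> by_cases h2 : x ∈ t <;> simp_all

lemma get?_pvD (steps : List Int) (M : Int) (meanders : Bool) :
    ∀ (k : Nat) (key : Int × Int),
      (pvD steps M meanders k).get? key =
        if (key.2 = 0 ∧ (if meanders then 0 ≤ key.1 ∧ key.1 ≤ M else key.1 = 0))
            ∨ (1 ≤ key.2 ∧ key.2 ≤ (k : Int) ∧ 0 ≤ key.1 ∧ key.1 ≤ M)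
        then some (pvF steps M meanders key.2.toNat key.1) else none := by
  intro k
  induction k with
  | zero =>
    intro key
    rcases key with ⟨x, y⟩
    show (pvInit M meanders).get? (x, y) = _
    unfold pvInit
    cases meanders with
    | false =>
      simp only [Bool.false_eq_true, if_false]
      rw [PySem.Dict.get?_insert]
      by_cases h1 : y = 0 <;> by_cases h2 : x = 0 <;>
        simp_all [Prod.ext_iff, PySem.Dict.get?_empty, pvF] <;> omega
    | true =>
      simp only [if_true]
      rw [get?_row_insert]
      simp only [PySem.List.mem_pyRange_one, PySem.Dict.get?_empty]
      by_cases h1 : y = 0 <;> by_cases h2 : 0 ≤ x ∧ x < M + 1 <;>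
        simp_all [pvF] <;> omega
  | succ k ih =>
    intro key
    rcases key with ⟨x, y⟩
    show ((PySem.List.pyRange 0 (M + 1) 1).foldl _ (pvD steps M meanders k)).get? (x, y) = _
    rw [get?_row_insert]
    simp only [ih, PySem.List.mem_pyRange_one]
    by_cases h1 : y = (k : Int) + 1
    · subst h1
      have hz : ¬((k:Int)+1 = 0) := by omega
      have hk : ¬((k:Int)+1 ≤ (k:Int)) := by omega
      have h1' : (1:Int) ≤ (k:Int)+1 := by omega
      have hy : ((k:Int)+1).toNat = k+1 := by omega
      have hb : ∀ z : Int, (0 ≤ z ∧ z < M+1) ↔ (0 ≤ z ∧ z ≤ M) := by intro z; omega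
      simp [hz, hk, h1', hy]
    · rw [if_neg (by simp [h1] : ¬((x,y).2 = (k:Int)+1 ∧ 0 ≤ (x,y).1 ∧ (x,y).1 < M+1))]
      have hiff : (((x,y).2 = 0 ∧ (if meanders = true then 0 ≤ (x,y).1 ∧ (x,y).1 ≤ M else (x,y).1 = 0)) ∨ (1 ≤ (x,y).2 ∧ (x,y).2 ≤ (k:Int) ∧ 0 ≤ (x,y).1 ∧ (x,y).1 ≤ M)) ↔ (((x,y).2 = 0 ∧ (if meanders = true then 0 ≤ (x,y).1 ∧ (x,y).1 ≤ M else (x,y).1 = 0)) ∨ (1 ≤ (x,y).2 ∧ (x,y).2 ≤ (k:Int)+1 ∧ 0 ≤ (x,y).1 ∧ (x,y).1 ≤ M)) := by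
        simp only
        constructor
        · rintro (h|h)
          exacts [Or.inl h, Or.inr ⟨h.1, by omega, h.2.2⟩]
        · rintro (h|h)
          exacts [Or.inl h, Or.inr ⟨h.1, by omega, h.2.2⟩]
      rw [if_congr hiff rfl rfl]
      push_cast
      rfl

lemma accA_eq (steps : List Int) (M : Int) (meanders : Bool) (hM : 0 ≤ M) (m : Nat)
    (d : PySem.Dict (Int × Int) Int)
    (hd : ∀ x : Int, d.get? (x, (m : Int)) =
      if (((m : Int) = 0) ∧ (if meanders = true then 0 ≤ x ∧ x ≤ M else x = 0))
          ∨ (1 ≤ (m : Int) ∧ 0 ≤ x ∧ x ≤ M)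
      then some (pvF steps M meanders m x) else none)
    (h : Int) :
    steps.foldl (fun acc s =>
        match d.get? (h + s, (m : Int)) with
        | some v => acc + v
        | none => acc) 0
      = pvF steps M meanders (m+1) h := by
  show _ = steps.foldl (fun acc s => if 0 ≤ h + s ∧ h + s ≤ M then acc + pvF steps M meanders m (h + s) else acc) 0
  apply PySem.List.foldl_congr_mem
  intro acc s _
  rw [hd (h + s)]
  cases m with
  | zero =>
    have h10 : ¬((1:Int) ≤ 0) := by omega
    cases meanders with
    | true =>
      by_cases hc : 0 ≤ h + s ∧ h + s ≤ M <;> simp [hc, h10]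
    | false =>
      by_cases hc : h + s = 0
      · simp [hc, h10, hM]
      · by_cases hr : 0 ≤ h + s ∧ h + s ≤ M <;> simp [pvF, hc, h10, hr]
  | succ n =>
    have hz : ¬(((n:Int)+1) = 0) := by omega
    have h1 : (1:Int) ≤ (n:Int)+1 := by omega
    push_cast
    simp only [hz, false_and, false_or, h1, true_and]
    by_cases hc : 0 ≤ h + s ∧ h + s ≤ M <;> simp [hc]

lemma rowA (steps : List Int) (M : Int) (meanders : Bool) (hM : 0 ≤ M) (m : Nat) :
    ∀ (hs : List Int) (d : PySem.Dict (Int × Int) Int),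
      (∀ x : Int, d.get? (x, (m : Int)) =
        if (((m : Int) = 0) ∧ (if meanders = true then 0 ≤ x ∧ x ≤ M else x = 0))
            ∨ (1 ≤ (m : Int) ∧ 0 ≤ x ∧ x ≤ M)
        then some (pvF steps M meanders m x) else none) →
      hs.foldl (fun tab h => tab.insert (h, (m:Int)+1)
        (steps.foldl (fun acc s =>
            match tab.get? (h + s, (m:Int)) with
            | some v => acc + v
            | none => acc) 0)) d
      = hs.foldl (fun d h => d.insert (h, (m:Int)+1) (pvF steps M meanders (m+1) h)) d := by
  intro hs
  induction hs with
  | nil => intro d _; rfl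
  | cons h t ih =>
    intro d hd
    simp only [List.foldl_cons]
    rw [accA_eq steps M meanders hM m d hd h]
    apply ih
    intro x
    rw [PySem.Dict.get?_insert, if_neg (by intro hE; rw [Prod.mk.injEq] at hE; omega)]
    exact hd x

def pvRowA (steps : List Int) (M : Int) (meanders : Bool)
    (tab : PySem.Dict (Int × Int) Int) (i : Int) : PySem.Dict (Int × Int) Int :=
  (PySem.List.pyRange 0 (M+1) 1).foldl (fun tab h =>
    tab.insert (h, i) (steps.foldl (fun acc s =>
      match tab.get? (h + s, i - 1) with
      | some v => acc + v
      | none => acc) 0)) tab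

lemma outerA (steps : List Int) (M : Int) (meanders : Bool) (hM : 0 ≤ M) :
    ∀ n : Nat,
      (PySem.List.pyRange 1 ((n:Int)+1) 1).foldl (pvRowA steps M meanders) (pvInit M meanders)
      = pvD steps M meanders n := by
  intro n
  induction n with
  | zero =>
    rw [PySem.List.pyRange_one_eq_nil (by omega)]
    rfl
  | succ n ih =>
    have hcast : ((n+1 : Nat) : Int) + 1 = ((n:Int)+1) + 1 := by push_cast; ring
    rw [hcast, PySem.List.pyRange_one_succ_right (by omega), List.foldl_append, ih]
    simp only [List.foldl_cons, List.foldl_nil]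
    unfold pvRowA
    simp only [show ((n:Int)+1) - 1 = (n:Int) from by ring]
    have hd : ∀ x : Int, (pvD steps M meanders n).get? (x, (n:Int)) =
        if (((n:Int) = 0) ∧ (if meanders = true then 0 ≤ x ∧ x ≤ M else x = 0))
            ∨ (1 ≤ (n:Int) ∧ 0 ≤ x ∧ x ≤ M)
        then some (pvF steps M meanders n x) else none := by
      intro x
      have h0 := get?_pvD steps M meanders n (x, (n:Int))
      simp only at h0
      rw [h0, Int.toNat_natCast]
      have hiff : (((n:Int) = 0 ∧ (if meanders = true then 0 ≤ x ∧ x ≤ M else x = 0)) ∨ (1 ≤ (n:Int) ∧ (n:Int) ≤ (n:Int) ∧ 0 ≤ x ∧ x ≤ M)) ↔ (((n:Int) = 0 ∧ (if meanders = true then 0 ≤ x ∧ x ≤ M else x = 0)) ∨ (1 ≤ (n:Int) ∧ 0 ≤ x ∧ x ≤ M)) := by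
        constructor
        · rintro (h|h)
          exacts [Or.inl h, Or.inr ⟨h.1, h.2.2⟩]
        · rintro (h|h)
          exacts [Or.inl h, Or.inr ⟨h.1, le_refl _, h.2⟩]
      exact if_congr hiff rfl rfl
    rw [rowA steps M meanders hM n (PySem.List.pyRange 0 (M+1) 1) (pvD steps M meanders n) hd]
    rfl

-- B-side: the memo only ever holds correct values of pvF.
def pvMemoOK (steps : List Int) (M : Int) (meanders : Bool)
    (memo : PySem.Dict (Int × Int) Int) : Prop :=
  ∀ (h j : Int) (v : Int), memo.get? (h, j) = some v → v = pvF steps M meanders j.toNat h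

lemma pvRec_spec (steps : List Int) (M : Int) (meanders : Bool) :
    ∀ (k : Nat) (h : Int) (memo : PySem.Dict (Int × Int) Int),
      pvMemoOK steps M meanders memo →
      (pvRec steps M meanders k h memo).1 = pvF steps M meanders k h
        ∧ pvMemoOK steps M meanders (pvRec steps M meanders k h memo).2 := by
  intro k
  induction k with
  | zero => intro h memo hok; exact ⟨rfl, hok⟩
  | succ k ih =>
    intro h memo hok
    cases hget : memo.get? (h, (k : Int) + 1) with
    | some v =>
      have hred : pvRec steps M meanders (k+1) h memo = (v, memo) := by
        simp only [pvRec, hget]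
      rw [hred]
      have hv := hok h ((k : Int) + 1) v hget
      have ht : ((k : Int) + 1).toNat = k + 1 := by omega
      rw [ht] at hv
      exact ⟨hv, hok⟩
    | none =>
      have hfold : ∀ (l : List Int) (a : Int) (m : PySem.Dict (Int × Int) Int),
          pvMemoOK steps M meanders m →
          (l.foldl (fun (p : Int × PySem.Dict (Int × Int) Int) s =>
              if 0 ≤ h + s ∧ h + s ≤ M then
                let q := pvRec steps M meanders k (h + s) p.2
                (p.1 + q.1, q.2)
              else p) (a, m)).1
            = l.foldl (fun acc s => if 0 ≤ h + s ∧ h + s ≤ M then acc + pvF steps M meanders k (h + s) else acc) a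
          ∧ pvMemoOK steps M meanders
              (l.foldl (fun (p : Int × PySem.Dict (Int × Int) Int) s =>
                if 0 ≤ h + s ∧ h + s ≤ M then
                  let q := pvRec steps M meanders k (h + s) p.2
                  (p.1 + q.1, q.2)
                else p) (a, m)).2 := by
        intro l
        induction l with
        | nil => intro a m hm; exact ⟨rfl, hm⟩
        | cons s t iht =>
          intro a m hm
          simp only [List.foldl_cons]
          by_cases hc : 0 ≤ h + s ∧ h + s ≤ M
          · simp only [if_pos hc]
            obtain ⟨hv, hm'⟩ := ih (h + s) m hm
            rw [hv]
            exact iht _ _ hm'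
          · simp only [if_neg hc]
            exact iht a m hm
      obtain ⟨hv, hm'⟩ := hfold steps 0 memo hok
      have hred : pvRec steps M meanders (k+1) h memo
          = ((steps.foldl (fun (p : Int × PySem.Dict (Int × Int) Int) s =>
              if 0 ≤ h + s ∧ h + s ≤ M then
                let q := pvRec steps M meanders k (h + s) p.2
                (p.1 + q.1, q.2)
              else p) (0, memo)).1,
             (steps.foldl (fun (p : Int × PySem.Dict (Int × Int) Int) s =>
              if 0 ≤ h + s ∧ h + s ≤ M then
                let q := pvRec steps M meanders k (h + s) p.2
                (p.1 + q.1, q.2)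
              else p) (0, memo)).2.insert (h, (k : Int) + 1)
              (steps.foldl (fun (p : Int × PySem.Dict (Int × Int) Int) s =>
              if 0 ≤ h + s ∧ h + s ≤ M then
                let q := pvRec steps M meanders k (h + s) p.2
                (p.1 + q.1, q.2)
              else p) (0, memo)).1) := by
        simp only [pvRec, hget]
      rw [hred]
      constructor
      · exact hv
      · intro x j w hw
        simp only at hw
        rw [PySem.Dict.get?_insert] at hw
        by_cases he : (x, j) = (h, (k : Int) + 1)
        · rw [if_pos he] at hw
          cases hw
          rw [Prod.mk.injEq] at he
          rw [he.1, he.2, hv]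
          have ht : ((k : Int) + 1).toNat = k + 1 := by omega
          rw [ht]
          rfl
        · rw [if_neg he] at hw
          exact hm' x j w hw

lemma rowB (steps : List Int) (M : Int) (meanders : Bool) (i : Int) :
    ∀ (hs : List Int) (d memo : PySem.Dict (Int × Int) Int),
      pvMemoOK steps M meanders memo →
      (hs.foldl (fun (q : PySem.Dict (Int × Int) Int × PySem.Dict (Int × Int) Int) h =>
          (q.1.insert (h, i) (pvRec steps M meanders i.toNat h q.2).1,
           (pvRec steps M meanders i.toNat h q.2).2)) (d, memo)).1
        = hs.foldl (fun d h => d.insert (h, i) (pvF steps M meanders i.toNat h)) d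
      ∧ pvMemoOK steps M meanders
          (hs.foldl (fun (q : PySem.Dict (Int × Int) Int × PySem.Dict (Int × Int) Int) h =>
            (q.1.insert (h, i) (pvRec steps M meanders i.toNat h q.2).1,
             (pvRec steps M meanders i.toNat h q.2).2)) (d, memo)).2 := by
  intro hs
  induction hs with
  | nil => intro d memo hm; exact ⟨rfl, hm⟩
  | cons h t ih =>
    intro d memo hm
    simp only [List.foldl_cons]
    obtain ⟨hv, hm'⟩ := pvRec_spec steps M meanders i.toNat h memo hm
    rw [hv]
    exact ih _ _ hm'

lemma outerB (steps : List Int) (M : Int) (meanders : Bool) :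
    ∀ n : Nat,
      ((PySem.List.pyRange 1 ((n:Int)+1) 1).foldl
        (fun (p : PySem.Dict (Int × Int) Int × PySem.Dict (Int × Int) Int) i =>
          (PySem.List.pyRange 0 (M + 1) 1).foldl
            (fun (q : PySem.Dict (Int × Int) Int × PySem.Dict (Int × Int) Int) h =>
              (q.1.insert (h, i) (pvRec steps M meanders i.toNat h q.2).1,
               (pvRec steps M meanders i.toNat h q.2).2)) p)
        (pvInit M meanders, PySem.Dict.empty)).1
        = pvD steps M meanders n
      ∧ pvMemoOK steps M meanders
        ((PySem.List.pyRange 1 ((n:Int)+1) 1).foldl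
          (fun (p : PySem.Dict (Int × Int) Int × PySem.Dict (Int × Int) Int) i =>
            (PySem.List.pyRange 0 (M + 1) 1).foldl
              (fun (q : PySem.Dict (Int × Int) Int × PySem.Dict (Int × Int) Int) h =>
                (q.1.insert (h, i) (pvRec steps M meanders i.toNat h q.2).1,
                 (pvRec steps M meanders i.toNat h q.2).2)) p)
          (pvInit M meanders, PySem.Dict.empty)).2 := by
  intro n
  induction n with
  | zero =>
    rw [PySem.List.pyRange_one_eq_nil (a := 1) (b := ((0:Nat):Int)+1) (by omega)]
    refine ⟨rfl, ?_⟩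
    intro x j v hv
    simp only [List.foldl_nil] at hv
    rw [PySem.Dict.get?_empty] at hv
    cases hv
  | succ n ih =>
    have hcast : ((n+1 : Nat) : Int) + 1 = ((n:Int)+1) + 1 := by push_cast; ring
    rw [hcast, PySem.List.pyRange_one_succ_right (a := 1) (b := (n:Int)+1) (by omega), List.foldl_append]
    simp only [List.foldl_cons, List.foldl_nil]
    obtain ⟨ih1, ih2⟩ := ih
    rcases hP : (PySem.List.pyRange 1 ((n:Int)+1) 1).foldl
        (fun (p : PySem.Dict (Int × Int) Int × PySem.Dict (Int × Int) Int) i =>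
          (PySem.List.pyRange 0 (M + 1) 1).foldl
            (fun (q : PySem.Dict (Int × Int) Int × PySem.Dict (Int × Int) Int) h =>
              (q.1.insert (h, i) (pvRec steps M meanders i.toNat h q.2).1,
               (pvRec steps M meanders i.toNat h q.2).2)) p)
        (pvInit M meanders, PySem.Dict.empty) with ⟨d, memo⟩
    rw [hP] at ih1 ih2
    simp only at ih1 ih2
    subst ih1
    obtain ⟨hr1, hr2⟩ := rowB steps M meanders ((n:Int)+1) (PySem.List.pyRange 0 (M+1) 1)
      (pvD steps M meanders n) memo ih2
    refine ⟨?_, hr2⟩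
    rw [hr1]
    have ht : ((n:Int)+1).toNat = n + 1 := by omega
    rw [ht]
    rfl

-- ===== VERDICT (by name: the statement is the Claim_ definition above) =====
theorem tabulate_halfplane_walks_spec : Claim_equal_tabulate_halfplane_walks := by
  intro steps N meanders _hdom _hpre
  unfold Spec_tabulate_halfplane_walks
  simp only [tabulate_halfplane_walks, tabulate_halfplane_walks_alt]
  by_cases hEarly : meanders = false ∧ N < 1
  · rw [if_pos hEarly]
    obtain ⟨hm, hN⟩ := hEarly
    subst hm
    rw [PySem.List.pyRange_one_eq_nil (show N + 1 ≤ 1 from by omega), List.foldl_nil]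
    simp
  · rw [if_neg hEarly]
    set mx := (PySem.List.max? steps id).getD 0 with hmx
    by_cases hN : N < 1
    · have hm : meanders = true := by
        cases meanders
        · exact absurd ⟨rfl, hN⟩ hEarly
        · rfl
      subst hm
      rw [PySem.List.pyRange_one_eq_nil (show N + 1 ≤ 1 from by omega)]
      simp only [List.foldl_nil, if_true,
        show (1:Int) + mx * N = mx * N + 1 from by ring]
    · by_cases hM : mx * N < 0
      · -- both height ranges are empty: A's table stays its (empty-range) init, B's state is never touched
        simp only [PySem.List.pyRange_one_eq_nil (show (1:Int) + mx * N ≤ 0 from by omega),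
          PySem.List.pyRange_one_eq_nil (show mx * N + 1 ≤ 0 from by omega),
          List.foldl_nil, PySem.List.foldl_ignore]
      · rw [show N + 1 = ((N.toNat : Nat) : Int) + 1 from by omega]
        simp only [show (1:Int) + mx * N = mx * N + 1 from by ring]
        show ((PySem.List.pyRange 1 (((N.toNat : Nat) : Int) + 1) 1).foldl (pvRowA steps (mx * N) meanders) (pvInit (mx * N) meanders)).items.map (fun p => (p.1.1, p.1.2, p.2))
          = (((PySem.List.pyRange 1 (((N.toNat : Nat) : Int) + 1) 1).foldl
              (fun (p : PySem.Dict (Int × Int) Int × PySem.Dict (Int × Int) Int) i =>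
                (PySem.List.pyRange 0 (mx * N + 1) 1).foldl
                  (fun (q : PySem.Dict (Int × Int) Int × PySem.Dict (Int × Int) Int) h =>
                    (q.1.insert (h, i) (pvRec steps (mx * N) meanders i.toNat h q.2).1,
                     (pvRec steps (mx * N) meanders i.toNat h q.2).2)) p)
              (pvInit (mx * N) meanders, PySem.Dict.empty)).1).items.map (fun p => (p.1.1, p.1.2, p.2))
        rw [outerA steps (mx * N) meanders (by omega) N.toNat,
          (outerB steps (mx * N) meanders N.toNat).1]
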